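-- pv_equiv track=rewrite | github.com/janu6ram/CP-Problems | 05-canqueenattack-Python/canqueenattack.py | right_down
-- ===== SOURCE A (Python) =====
-- def right_down(qr, qc, r, c):
--     row = qr
--     col = qc
--     while col != 0:
--         if row == r and col == c:
--             return True
--         row -= 1
--         col -= 1
--     return False
-- ===== SOURCE B (Python) =====
-- def right_down(qr, qc, r, c):
--     # O(1): (r, c) lies on the left-up diagonal of (qr, qc) iff the offsets
--     # match and the column is one the loop would visit (1..qc).
--     return qr - r == qc - c and 1 <= c <= qc
-- ===== Notes on version B (the rewrite author's own statement) =====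
-- stated objective: faster
-- what changed: Replaced the step-by-step walk down the diagonal with a closed-form O(1) test (equal diagonal offset and 1 <= c <= qc).
-- outside the precondition, e.g. on right_down(-3, -3, -5, -5): A returns True, B returns False
import Mathlib
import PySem

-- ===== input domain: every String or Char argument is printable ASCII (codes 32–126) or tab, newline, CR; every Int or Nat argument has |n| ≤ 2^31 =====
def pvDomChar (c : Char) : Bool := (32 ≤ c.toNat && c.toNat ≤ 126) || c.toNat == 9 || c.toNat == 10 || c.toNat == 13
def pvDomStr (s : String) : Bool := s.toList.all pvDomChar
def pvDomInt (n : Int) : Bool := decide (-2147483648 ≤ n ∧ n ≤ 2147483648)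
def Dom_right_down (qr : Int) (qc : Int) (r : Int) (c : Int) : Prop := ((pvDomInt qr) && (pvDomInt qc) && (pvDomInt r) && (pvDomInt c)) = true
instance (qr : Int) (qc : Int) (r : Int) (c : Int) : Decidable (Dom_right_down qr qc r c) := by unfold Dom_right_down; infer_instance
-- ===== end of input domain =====

-- B replaces A's step-by-step walk down the diagonal with a closed-form O(1) membership test.


-- ===== PORT A =====
-- Literal port of A's while-loop: check (row,col)=(r,c) then step (row-1,col-1) until col=0.
-- The extra 'col < 0 → false' branch is a totality guard only: for col < 0 the Python loop
-- diverges (never reached inside Pre_right_down).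
def rdLoop (row : Int) (col : Int) (r : Int) (c : Int) : Bool :=
  if col = 0 then false
  else if row = r ∧ col = c then true
  else if h : col < 0 then false
  else rdLoop (row - 1) (col - 1) r c
termination_by col.toNat
decreasing_by omega

def right_down (qr : Int) (qc : Int) (r : Int) (c : Int) : Bool :=
  rdLoop qr qc r c

-- ===== PORT B =====
def right_down_alt (qr : Int) (qc : Int) (r : Int) (c : Int) : Bool :=
  decide (qr - r = qc - c ∧ 1 ≤ c ∧ c ≤ qc)

-- ===== PRECONDITION & SPEC =====
-- Pre_ restricts to qc ≥ 0, the natural chessboard-column domain: for qc < 0 A's loop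
-- diverges except on the thin diagonal {qr - r = qc - c ∧ c ≤ qc}, where it happens to return True.
def Pre_right_down (qr : Int) (qc : Int) (r : Int) (c : Int) : Prop := 0 ≤ qc
instance (qr : Int) (qc : Int) (r : Int) (c : Int) : Decidable (Pre_right_down qr qc r c) := by unfold Pre_right_down; infer_instance
def pvWitness_right_down : Int × Int × Int × Int := (5, 5, 3, 3)
def Spec_right_down (qr : Int) (qc : Int) (r : Int) (c : Int) (out : Bool) : Prop := out = right_down_alt qr qc r c
instance (qr : Int) (qc : Int) (r : Int) (c : Int) (out : Bool) : Decidable (Spec_right_down qr qc r c out) := by unfold Spec_right_down; infer_instance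

-- ===== CLAIM (what is proved, stated in full; the proofs are below) =====
def Claim_equal_right_down : Prop := ∀ (qr : Int) (qc : Int) (r : Int) (c : Int), Dom_right_down qr qc r c → Pre_right_down qr qc r c → Spec_right_down qr qc r c (right_down qr qc r c)

-- ===== LEMMAS AND PROOFS =====
theorem rdLoop_closed (n : Nat) : ∀ (row r c : Int),
    rdLoop row (n : Int) r c = decide (row - r = (n : Int) - c ∧ 1 ≤ c ∧ c ≤ (n : Int)) := by
  induction n with
  | zero =>
    intro row r c
    rw [rdLoop]
    simp only [Nat.cast_zero, if_pos]
    have : ¬ (row - r = (0 : Int) - c ∧ 1 ≤ c ∧ c ≤ (0 : Int)) := by omega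
    simp only [this, decide_false]
  | succ n ih =>
    intro row r c
    rw [rdLoop]
    have h0 : ((n + 1 : Nat) : Int) ≠ 0 := by push_cast; omega
    have h1 : ¬ ((n + 1 : Nat) : Int) < 0 := by push_cast; omega
    rw [if_neg h0, dif_neg h1]
    by_cases hc : row = r ∧ ((n + 1 : Nat) : Int) = c
    · have : (row - r = ((n + 1 : Nat) : Int) - c ∧ 1 ≤ c ∧ c ≤ ((n + 1 : Nat) : Int)) := by
        push_cast at hc ⊢; omega
      simp [hc, this]
    · have hrec : ((n + 1 : Nat) : Int) - 1 = (n : Int) := by push_cast; ring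
      rw [if_neg hc, hrec, ih]
      have : (row - 1 - r = (n : Int) - c ∧ 1 ≤ c ∧ c ≤ (n : Int)) ↔
             (row - r = ((n + 1 : Nat) : Int) - c ∧ 1 ≤ c ∧ c ≤ ((n + 1 : Nat) : Int)) := by
        push_cast at hc ⊢; omega
      simp [this]

-- ===== VERDICT (by name: the statement is the Claim_ definition above) =====
theorem right_down_spec : Claim_equal_right_down := by
  intro qr qc r c _ hpre
  unfold Spec_right_down right_down right_down_alt
  obtain ⟨n, rfl⟩ : ∃ n : Nat, qc = (n : Int) := ⟨qc.toNat, by have h : (0 : Int) ≤ qc := hpre; omega⟩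
  exact rdLoop_closed n qr r c
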